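-- pv_equiv track=rewrite | github.com/mriffle/miller-mzml-filterer | tests/test_smoke_real_data.py | _resolve_precursors_locally
-- ===== SOURCE A (Python) =====
-- def _resolve_precursors_locally(
--     selected_ids: list[str],
--     precursor_by_id: dict[str, str | None],
--     source_order: list[str],
-- ) -> list[str]:
--     selected_set = set(selected_ids)
--     for scan_id in list(selected_ids):
--         current = scan_id
--         seen: set[str] = set()
--         while True:
--             precursor = precursor_by_id.get(current)
--             if precursor is None or precursor == current or precursor in seen:
--                 break
--             seen.add(precursor)
--             if precursor not in precursor_by_id:
--                 break
--             if precursor in selected_set: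
--                 current = precursor
--                 continue
--             selected_set.add(precursor)
--             current = precursor
--     return [scan_id for scan_id in source_order if scan_id in selected_set]
-- ===== SOURCE B (Python) =====
-- def _resolve_precursors_locally(
--     selected_ids: list[str],
--     precursor_by_id: dict[str, str | None],
--     source_order: list[str],
-- ) -> list[str]:
--     # Fixpoint closure: repeatedly sweep the precursor table, marking the
--     # precursor of any already-marked scan, until a full sweep adds nothing.
--     visited = set(selected_ids)
--     changed = True
--     while changed:
--         changed = False
--         for scan_id, precursor in precursor_by_id.items():
--             if (
--                 scan_id in visited
--                 and precursor is not None
--                 and precursor != scan_id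
--                 and precursor in precursor_by_id
--                 and precursor not in visited
--             ):
--                 visited.add(precursor)
--                 changed = True
--     return [scan_id for scan_id in source_order if scan_id in visited]
-- ===== Notes on version B (the rewrite author's own statement) =====
-- stated objective: alternative
-- what changed: Replaces A's per-selected-id precursor-chain walks (each with its own per-walk 'seen' set) by a fixpoint computation: repeated whole-table sweeps that mark the precursor of every already-marked scan until a sweep changes nothing; the marked set equals A's and the same source_order filter is returned.
import Mathlib
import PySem

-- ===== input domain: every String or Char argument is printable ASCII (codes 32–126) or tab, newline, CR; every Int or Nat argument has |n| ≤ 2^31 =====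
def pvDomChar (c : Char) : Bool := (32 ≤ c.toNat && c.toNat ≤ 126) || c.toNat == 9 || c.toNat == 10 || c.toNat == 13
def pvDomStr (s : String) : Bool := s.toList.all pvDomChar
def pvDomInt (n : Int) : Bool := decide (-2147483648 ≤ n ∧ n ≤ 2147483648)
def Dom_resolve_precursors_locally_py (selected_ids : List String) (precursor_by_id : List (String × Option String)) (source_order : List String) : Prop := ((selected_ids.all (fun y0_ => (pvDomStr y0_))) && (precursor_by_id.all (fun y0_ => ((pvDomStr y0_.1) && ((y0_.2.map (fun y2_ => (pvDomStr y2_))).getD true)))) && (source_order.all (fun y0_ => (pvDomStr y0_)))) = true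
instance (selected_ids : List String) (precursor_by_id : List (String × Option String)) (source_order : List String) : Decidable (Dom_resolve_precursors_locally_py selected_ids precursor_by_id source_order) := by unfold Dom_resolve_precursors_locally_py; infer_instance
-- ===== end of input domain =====

-- B replaces A's per-selected-id chain re-walks by a fixpoint computation: repeated
-- sweeps over the precursor table mark the precursor of every already-marked scan,
-- until a sweep adds nothing (objective: alternative algorithm; same filtered output).

-- ===== PORT A =====
-- termination measure helper for A's inner loop (cited in decreasing_by): adding a fresh
-- element of V to the set strictly decreases the count of V-elements not yet in the set
lemma pvCountP_add_lt (V : List String) (seen : PySem.Set String) (p : String)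
    (hmem : p ∈ V) (hnc : PySem.Set.contains seen p = false) :
    V.countP (fun v => !(PySem.Set.contains (PySem.Set.add seen p) v)) <
      V.countP (fun v => !(PySem.Set.contains seen v)) := by
  have hmono : ∀ w : String, (!(PySem.Set.contains (PySem.Set.add seen p) w)) = true →
      (!(PySem.Set.contains seen w)) = true := by
    intro w hw
    rw [Bool.not_eq_true'] at hw ⊢
    cases hsw : PySem.Set.contains seen w with
    | false => rfl
    | true =>
      have hc : PySem.Set.contains (PySem.Set.add seen p) w = true :=
        (PySem.Set.contains_iff _ _).mpr ((PySem.Set.mem_add _ _ _).mpr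
          (Or.inl ((PySem.Set.contains_iff _ _).mp hsw)))
      rw [hc] at hw
      exact absurd hw (by decide)
  induction V with
  | nil => cases hmem
  | cons v vs ih =>
    by_cases hvp : v = p
    · subst hvp
      have hc : PySem.Set.contains (PySem.Set.add seen v) v = true :=
        (PySem.Set.contains_iff _ _).mpr ((PySem.Set.mem_add _ _ _).mpr (Or.inr rfl))
      have hle : vs.countP (fun w => !(PySem.Set.contains (PySem.Set.add seen v) w)) ≤
          vs.countP (fun w => !(PySem.Set.contains seen w)) :=
        List.countP_mono_left (fun w _ => hmono w)
      have h1 : ¬((fun w => !(PySem.Set.contains (PySem.Set.add seen v) w)) v = true) := by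
        simp only [hc, Bool.not_true]; exact fun h => absurd h (by decide)
      have h2 : (fun w => !(PySem.Set.contains seen w)) v = true := by
        simp only [hnc, Bool.not_false]
      rw [List.countP_cons_of_neg (p := fun w => !(PySem.Set.contains (PySem.Set.add seen v) w)) h1,
        List.countP_cons_of_pos (p := fun w => !(PySem.Set.contains seen w)) h2]
      omega
    · have hmem' : p ∈ vs := by
        rcases List.mem_cons.mp hmem with h | h
        · exact absurd h.symm hvp
        · exact h
      have hstep := ih hmem'
      by_cases h1 : (fun w => !(PySem.Set.contains (PySem.Set.add seen p) w)) v = true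
      · have h2 : (fun w => !(PySem.Set.contains seen w)) v = true := hmono v h1
        rw [List.countP_cons_of_pos (p := fun w => !(PySem.Set.contains (PySem.Set.add seen p) w)) h1,
          List.countP_cons_of_pos (p := fun w => !(PySem.Set.contains seen w)) h2]
        omega
      · rw [List.countP_cons_of_neg (p := fun w => !(PySem.Set.contains (PySem.Set.add seen p) w)) h1,
          List.countP_cons (p := fun w => !(PySem.Set.contains seen w))]
        omega

def pvAVals (d : PySem.Dict String (Option String)) : List String := d.values.filterMap id

lemma pvMem_vals {d : PySem.Dict String (Option String)} {c p : String}
    (h : (d.get? c).getD none = some p) : p ∈ pvAVals d := by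
  have hg : d.get? c = some (some p) := by
    cases hh : d.get? c with
    | none => simp [hh] at h
    | some v =>
      simp only [hh, Option.getD_some] at h
      exact congrArg some h
  have hi : (c, some p) ∈ d.items := PySem.Dict.mem_items_of_get?_eq_some d hg
  have hv : (some p) ∈ d.items.map (·.2) := List.mem_map.mpr ⟨(c, some p), hi, rfl⟩
  simpa [pvAVals, PySem.Dict.values] using List.mem_filterMap.mpr ⟨some p, hv, rfl⟩

-- A's inner while-loop, one chain walk; transliteration of A's loop body
def pvAWalk (d : PySem.Dict String (Option String)) (current : String)
    (seen : PySem.Set String) (sel : PySem.Set String) : PySem.Set String :=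
  match h : (d.get? current).getD none with
  | none => sel
  | some p =>
    if hb : p = current ∨ PySem.Set.contains seen p = true then sel
    else
      if d.contains p = false then sel
      else if PySem.Set.contains sel p = true then pvAWalk d p (PySem.Set.add seen p) sel
      else pvAWalk d p (PySem.Set.add seen p) (PySem.Set.add sel p)
termination_by (pvAVals d).countP (fun v => !(PySem.Set.contains seen v))
decreasing_by
  · exact pvCountP_add_lt _ _ _ (pvMem_vals h) (by simpa using (not_or.mp hb).2)
  · exact pvCountP_add_lt _ _ _ (pvMem_vals h) (by simpa using (not_or.mp hb).2)

def resolve_precursors_locally_py (selected_ids : List String) (precursor_by_id : List (String × Option String)) (source_order : List String) : List String :=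
  let d := PySem.Dict.ofList precursor_by_id
  let finalSet := selected_ids.foldl (fun sel scan_id => pvAWalk d scan_id PySem.Set.empty sel)
    (PySem.Set.ofList selected_ids)
  source_order.filter (fun scan_id => PySem.Set.contains finalSet scan_id)

-- ===== PORT B =====
-- the body of B's for-loop: one table entry, state = (visited, changed)
def pvMark (d : PySem.Dict String (Option String)) (st : PySem.Set String × Bool)
    (kv : String × Option String) : PySem.Set String × Bool :=
  match kv.2 with
  | none => st
  | some precursor =>
    if PySem.Set.contains st.1 kv.1 = true ∧ precursor ≠ kv.1 ∧
        d.contains precursor = true ∧ PySem.Set.contains st.1 precursor = false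
    then (PySem.Set.add st.1 precursor, true)
    else st

-- sweeps only grow the visited set
lemma pvMarkFold_mono (d : PySem.Dict String (Option String)) :
    ∀ (items : List (String × Option String)) (st : PySem.Set String × Bool) (x : String),
    PySem.Set.contains st.1 x = true →
    PySem.Set.contains (items.foldl (pvMark d) st).1 x = true := by
  intro items
  induction items with
  | nil => intro st x hx; exact hx
  | cons kv rest ih =>
    intro st x hx
    rw [List.foldl_cons]
    rcases kv with ⟨k, v⟩
    cases v with
    | none => exact ih st x hx
    | some p =>
      simp only [pvMark]
      by_cases hc : PySem.Set.contains st.1 k = true ∧ p ≠ k ∧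
          d.contains p = true ∧ PySem.Set.contains st.1 p = false
      · rw [if_pos hc]
        refine ih _ x ?_
        exact (PySem.Set.contains_iff _ _).mpr
          ((PySem.Set.mem_add _ _ _).mpr (Or.inl ((PySem.Set.contains_iff _ _).mp hx)))
      · rw [if_neg hc]
        exact ih st x hx

-- counting consequence of monotonicity (used by the progress lemma)
lemma pvCount_le_of_mono (V : List String) (v v' : PySem.Set String)
    (h : ∀ x, PySem.Set.contains v x = true → PySem.Set.contains v' x = true) :
    V.countP (fun k => !(PySem.Set.contains v' k)) ≤ V.countP (fun k => !(PySem.Set.contains v k)) := by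
  refine List.countP_mono_left ?_
  intro w _ hw
  rw [Bool.not_eq_true'] at hw ⊢
  cases hc : PySem.Set.contains v w with
  | false => rfl
  | true => rw [h w hc] at hw; exact absurd hw (by decide)

-- a sweep that reports a change strictly shrank the pool of unmarked keys
lemma pvMarkFold_progress (d : PySem.Dict String (Option String)) :
    ∀ (items : List (String × Option String)) (st : PySem.Set String × Bool),
    (items.foldl (pvMark d) st).2 = true →
    st.2 = true ∨
      d.keys.countP (fun k => !(PySem.Set.contains (items.foldl (pvMark d) st).1 k)) <
        d.keys.countP (fun k => !(PySem.Set.contains st.1 k)) := by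
  intro items
  induction items with
  | nil => intro st h; exact Or.inl h
  | cons kv rest ih =>
    intro st h
    rw [List.foldl_cons] at h ⊢
    rcases kv with ⟨k, v⟩
    cases v with
    | none =>
      have hid : pvMark d st (k, (none : Option String)) = st := by simp [pvMark]
      rw [hid] at h ⊢
      exact ih st h
    | some p =>
      by_cases hc : PySem.Set.contains st.1 k = true ∧ p ≠ k ∧
          d.contains p = true ∧ PySem.Set.contains st.1 p = false
      · have hid : pvMark d st (k, some p) = (PySem.Set.add st.1 p, true) := by
          simp only [pvMark]; rw [if_pos hc]
        rw [hid] at h ⊢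
        refine Or.inr (lt_of_le_of_lt
          (b := d.keys.countP (fun k => !(PySem.Set.contains (PySem.Set.add st.1 p) k))) ?_ ?_)
        · exact pvCount_le_of_mono d.keys _ _ (fun x hx =>
            pvMarkFold_mono d rest (PySem.Set.add st.1 p, true) x hx)
        · exact pvCountP_add_lt d.keys st.1 p
            ((PySem.Dict.contains_iff_mem_keys d p).mp hc.2.2.1) hc.2.2.2
      · have hid : pvMark d st (k, some p) = st := by
          simp only [pvMark]; rw [if_neg hc]
        rw [hid] at h ⊢
        exact ih st h

-- one full sweep over the table, starting with the changed flag down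
def pvSweep (d : PySem.Dict String (Option String)) (visited : PySem.Set String) :
    PySem.Set String × Bool :=
  d.items.foldl (pvMark d) (visited, false)

-- B's while-loop: sweep the whole table; run another sweep only if something changed
def pvBFix (d : PySem.Dict String (Option String)) (visited : PySem.Set String) :
    PySem.Set String :=
  if hch : (pvSweep d visited).2 = true
  then pvBFix d (pvSweep d visited).1
  else (pvSweep d visited).1
termination_by d.keys.countP (fun k => !(PySem.Set.contains visited k))
decreasing_by
  rcases pvMarkFold_progress d d.items (visited, false) hch with h | h
  · simp at h
  · exact h

def resolve_precursors_locally_py_alt (selected_ids : List String) (precursor_by_id : List (String × Option String)) (source_order : List String) : List String :=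
  let d := PySem.Dict.ofList precursor_by_id
  let visited := pvBFix d (PySem.Set.ofList selected_ids)
  source_order.filter (fun scan_id => PySem.Set.contains visited scan_id)

-- ===== PRECONDITION & SPEC =====
def Spec_resolve_precursors_locally_py (selected_ids : List String) (precursor_by_id : List (String × Option String)) (source_order : List String) (out : List String) : Prop := out = resolve_precursors_locally_py_alt selected_ids precursor_by_id source_order
instance (selected_ids : List String) (precursor_by_id : List (String × Option String)) (source_order : List String) (out : List String) : Decidable (Spec_resolve_precursors_locally_py selected_ids precursor_by_id source_order out) := by unfold Spec_resolve_precursors_locally_py; infer_instance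

-- ===== CLAIM (what is proved, stated in full; the proofs are below) =====
def Claim_equal_resolve_precursors_locally_py : Prop := ∀ (selected_ids : List String) (precursor_by_id : List (String × Option String)) (source_order : List String), Dom_resolve_precursors_locally_py selected_ids precursor_by_id source_order → Spec_resolve_precursors_locally_py selected_ids precursor_by_id source_order (resolve_precursors_locally_py selected_ids precursor_by_id source_order)

-- ===== LEMMAS AND PROOFS =====

-- one chain step of the walk: x's precursor is y, y ≠ x, and y is a dict key
def pvStep (d : PySem.Dict String (Option String)) (x y : String) : Prop :=
  (d.get? x).getD none = some y ∧ y ≠ x ∧ d.contains y = true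

-- ids reachable from the selected ones by chain steps: the set both programs compute
inductive pvReach (sel : List String) (d : PySem.Dict String (Option String)) : String → Prop
  | base {x : String} : x ∈ sel → pvReach sel d x
  | step {x y : String} : pvReach sel d x → pvStep d x y → pvReach sel d y

-- repackaged Set facts used throughout
lemma pvContains_add_iff (s : PySem.Set String) (x y : String) :
    PySem.Set.contains (PySem.Set.add s x) y = true ↔ PySem.Set.contains s y = true ∨ y = x := by
  rw [PySem.Set.contains_iff]
  rw [PySem.Set.mem_add]
  constructor
  · rintro (h | h)
    · exact Or.inl ((PySem.Set.contains_iff _ _).mpr h)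
    · exact Or.inr h
  · rintro (h | h)
    · exact Or.inl ((PySem.Set.contains_iff _ _).mp h)
    · exact Or.inr h

lemma pvContains_empty (y : String) :
    PySem.Set.contains PySem.Set.empty y = true → False := by
  intro h
  have := (PySem.Set.contains_iff _ _).mp h
  simp [PySem.Set.empty] at this

-- the walk's quadruple invariant: monotone, sound for pvReach, result closed except
-- on old elements, and the current id's successor lands in the result
lemma pvAWalk_spec (d : PySem.Dict String (Option String)) (sel0 : List String)
    (current : String) (seen sel : PySem.Set String) :
    (∀ y, PySem.Set.contains seen y = true → d.contains y = true → PySem.Set.contains sel y = true) →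
    (∀ x, PySem.Set.contains sel x = true → pvReach sel0 d x) →
    pvReach sel0 d current →
    (∀ x, PySem.Set.contains sel x = true → PySem.Set.contains (pvAWalk d current seen sel) x = true) ∧
    (∀ x, PySem.Set.contains (pvAWalk d current seen sel) x = true → pvReach sel0 d x) ∧
    (∀ x, PySem.Set.contains (pvAWalk d current seen sel) x = true →
      PySem.Set.contains sel x = true ∨ ∀ y, pvStep d x y → PySem.Set.contains (pvAWalk d current seen sel) y = true) ∧
    (∀ y, pvStep d current y → PySem.Set.contains (pvAWalk d current seen sel) y = true) := by
  fun_induction pvAWalk d current seen sel with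
  | case1 current seen sel h =>
    intro Hseen Hsound Hcur
    refine ⟨fun x hx => hx, Hsound, fun x hx => Or.inl hx, ?_⟩
    intro y hy
    rw [hy.1] at h
    cases h
  | case2 current seen sel p h hb =>
    intro Hseen Hsound Hcur
    refine ⟨fun x hx => hx, Hsound, fun x hx => Or.inl hx, ?_⟩
    intro y hy
    have hyp : y = p := by
      have := hy.1
      rw [h] at this
      exact (Option.some.inj this).symm
    subst hyp
    rcases hb with hb | hb
    · exact absurd hb hy.2.1
    · exact Hseen y hb hy.2.2
  | case3 current seen sel p h hb hk =>
    intro Hseen Hsound Hcur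
    refine ⟨fun x hx => hx, Hsound, fun x hx => Or.inl hx, ?_⟩
    intro y hy
    have hyp : y = p := by
      have := hy.1
      rw [h] at this
      exact (Option.some.inj this).symm
    subst hyp
    exact absurd hy.2.2 (by simp [hk])
  | case4 current seen sel p h hb hk hsel ih =>
    intro Hseen Hsound Hcur
    have hkey : d.contains p = true := by
      cases hc : d.contains p with
      | true => rfl
      | false => exact absurd hc hk
    have hpc : p ≠ current := fun he => (not_or.mp hb).1 he
    have hreachp : pvReach sel0 d p := pvReach.step Hcur ⟨h, hpc, hkey⟩
    have Hseen' : ∀ y, PySem.Set.contains (PySem.Set.add seen p) y = true →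
        d.contains y = true → PySem.Set.contains sel y = true := by
      intro y hy hky
      rcases (pvContains_add_iff _ _ _).mp hy with hy | hy
      · exact Hseen y hy hky
      · subst hy; exact hsel
    obtain ⟨C1, C2, C3, C4⟩ := ih Hseen' Hsound hreachp
    refine ⟨C1, C2, ?_, ?_⟩
    · intro x hx
      rcases C3 x hx with hx' | hx'
      · exact Or.inl hx'
      · exact Or.inr hx'
    · intro y hy
      have hyp : p = y := by
        have := hy.1
        rw [h] at this
        exact Option.some.inj this
      exact hyp ▸ C1 p hsel
  | case5 current seen sel p h hb hk hsel ih =>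
    intro Hseen Hsound Hcur
    have hkey : d.contains p = true := by
      cases hc : d.contains p with
      | true => rfl
      | false => exact absurd hc hk
    have hpc : p ≠ current := fun he => (not_or.mp hb).1 he
    have hreachp : pvReach sel0 d p := pvReach.step Hcur ⟨h, hpc, hkey⟩
    have hselp : PySem.Set.contains (PySem.Set.add sel p) p = true :=
      (pvContains_add_iff _ _ _).mpr (Or.inr rfl)
    have Hseen' : ∀ y, PySem.Set.contains (PySem.Set.add seen p) y = true →
        d.contains y = true → PySem.Set.contains (PySem.Set.add sel p) y = true := by
      intro y hy hky
      rcases (pvContains_add_iff _ _ _).mp hy with hy | hy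
      · exact (pvContains_add_iff _ _ _).mpr (Or.inl (Hseen y hy hky))
      · subst hy; exact hselp
    have Hsound' : ∀ x, PySem.Set.contains (PySem.Set.add sel p) x = true → pvReach sel0 d x := by
      intro x hx
      rcases (pvContains_add_iff _ _ _).mp hx with hx | hx
      · exact Hsound x hx
      · subst hx; exact hreachp
    obtain ⟨C1, C2, C3, C4⟩ := ih Hseen' Hsound' hreachp
    refine ⟨?_, C2, ?_, ?_⟩
    · intro x hx
      exact C1 x ((pvContains_add_iff _ _ _).mpr (Or.inl hx))
    · intro x hx
      rcases C3 x hx with hx' | hx'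
      · rcases (pvContains_add_iff _ _ _).mp hx' with hx'' | hx''
        · exact Or.inl hx''
        · subst hx''
          exact Or.inr C4
      · exact Or.inr hx'
    · intro y hy
      have hyp : p = y := by
        have := hy.1
        rw [h] at this
        exact Option.some.inj this
      exact hyp ▸ C1 p hselp

-- the foldl over all selected ids: monotone, sound, and the final set is step-closed
lemma pvAFold_spec (d : PySem.Dict String (Option String)) (sel0 : List String) :
    ∀ (rem : List String) (sel : PySem.Set String),
    (∀ s ∈ rem, pvReach sel0 d s) →
    (∀ x, PySem.Set.contains sel x = true → pvReach sel0 d x) →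
    (∀ x, PySem.Set.contains sel x = true → x ∈ rem ∨ ∀ y, pvStep d x y → PySem.Set.contains sel y = true) →
    (∀ x, PySem.Set.contains sel x = true →
      PySem.Set.contains (rem.foldl (fun sel scan_id => pvAWalk d scan_id PySem.Set.empty sel) sel) x = true) ∧
    (∀ x, PySem.Set.contains (rem.foldl (fun sel scan_id => pvAWalk d scan_id PySem.Set.empty sel) sel) x = true → pvReach sel0 d x) ∧
    (∀ x y, PySem.Set.contains (rem.foldl (fun sel scan_id => pvAWalk d scan_id PySem.Set.empty sel) sel) x = true → pvStep d x y →
      PySem.Set.contains (rem.foldl (fun sel scan_id => pvAWalk d scan_id PySem.Set.empty sel) sel) y = true) := by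
  intro rem
  induction rem with
  | nil =>
    intro sel _ Hsound Hinv
    refine ⟨fun x hx => hx, Hsound, ?_⟩
    intro x y hx hxy
    rcases Hinv x hx with h | h
    · cases h
    · exact h y hxy
  | cons s rest ih =>
    intro sel Hrem Hsound Hinv
    obtain ⟨C1, C2, C3, C4⟩ := pvAWalk_spec d sel0 s PySem.Set.empty sel
      (fun y hy _ => absurd hy (fun hc => pvContains_empty y hc))
      Hsound (Hrem s (List.mem_cons_self ..))
    have Hinv' : ∀ x, PySem.Set.contains (pvAWalk d s PySem.Set.empty sel) x = true →
        x ∈ rest ∨ ∀ y, pvStep d x y → PySem.Set.contains (pvAWalk d s PySem.Set.empty sel) y = true := by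
      intro x hx
      rcases C3 x hx with hx' | hcl
      · rcases Hinv x hx' with hr | hcl
        · rcases List.mem_cons.mp hr with he | he
          · subst he; exact Or.inr C4
          · exact Or.inl he
        · exact Or.inr (fun y hy => C1 y (hcl y hy))
      · exact Or.inr hcl
    obtain ⟨D1, D2, D3⟩ := ih (pvAWalk d s PySem.Set.empty sel)
      (fun t ht => Hrem t (List.mem_cons_of_mem _ ht)) C2 Hinv'
    exact ⟨fun x hx => D1 x (C1 x hx), D2, D3⟩

-- A's final set holds exactly the pvReach-able ids
lemma pvA_iff (d : PySem.Dict String (Option String)) (selected_ids : List String) (x : String) :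
    PySem.Set.contains (selected_ids.foldl (fun sel scan_id => pvAWalk d scan_id PySem.Set.empty sel)
      (PySem.Set.ofList selected_ids)) x = true ↔ pvReach selected_ids d x := by
  have hbase : ∀ z, PySem.Set.contains (PySem.Set.ofList selected_ids) z = true → pvReach selected_ids d z :=
    fun z hz => pvReach.base ((PySem.Set.mem_ofList _ _).mp ((PySem.Set.contains_iff _ _).mp hz))
  obtain ⟨C1, C2, C3⟩ := pvAFold_spec d selected_ids selected_ids (PySem.Set.ofList selected_ids)
    (fun s hs => pvReach.base hs) hbase
    (fun z hz => Or.inl ((PySem.Set.mem_ofList _ _).mp ((PySem.Set.contains_iff _ _).mp hz)))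
  constructor
  · exact C2 x
  · intro hr
    induction hr with
    | base hx =>
      exact C1 _ ((PySem.Set.contains_iff _ _).mpr ((PySem.Set.mem_ofList _ _).mpr hx))
    | step _ hs ihr => exact C3 _ _ ihr hs

-- ===== B-side lemmas =====

-- new marks are sound: every element of a sweep's result set is reachable
lemma pvMarkFold_sound (d : PySem.Dict String (Option String)) (sel0 : List String)
    (hnd : d.keys.Nodup) :
    ∀ (items : List (String × Option String)), (∀ kv ∈ items, kv ∈ d.items) →
    ∀ (st : PySem.Set String × Bool),
    (∀ x, PySem.Set.contains st.1 x = true → pvReach sel0 d x) →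
    ∀ x, PySem.Set.contains (items.foldl (pvMark d) st).1 x = true → pvReach sel0 d x := by
  intro items
  induction items with
  | nil => intro _ st hst x hx; exact hst x hx
  | cons kv rest ih =>
    intro hsub st hst
    have hmem : kv ∈ d.items := hsub kv (List.mem_cons_self ..)
    intro x hx
    rw [List.foldl_cons] at hx
    refine ih (fun a ha => hsub a (List.mem_cons_of_mem _ ha)) (pvMark d st kv) ?_ x hx
    clear hx x
    rcases kv with ⟨k, v⟩
    cases v with
    | none => exact hst
    | some p =>
      intro x hx
      by_cases hc : PySem.Set.contains st.1 k = true ∧ p ≠ k ∧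
          d.contains p = true ∧ PySem.Set.contains st.1 p = false
      · have hid : pvMark d st (k, some p) = (PySem.Set.add st.1 p, true) := by
          simp only [pvMark]; rw [if_pos hc]
        rw [hid] at hx
        rcases (pvContains_add_iff _ _ _).mp hx with hx' | hx'
        · exact hst x hx'
        · subst hx'
          have hg : d.get? k = some (some x) := PySem.Dict.get?_of_mem_items d hmem hnd
          exact pvReach.step (hst k hc.1) ⟨by rw [hg]; rfl, hc.2.1, hc.2.2.1⟩
      · have hid : pvMark d st (k, some p) = st := by
          simp only [pvMark]; rw [if_neg hc]
        rw [hid] at hx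
        exact hst x hx

-- a sweep that reports no change kept the set intact and certifies step-closedness
-- once the changed flag is set, it stays set for the rest of the sweep
lemma pvMarkFold_snd_true (d : PySem.Dict String (Option String)) :
    ∀ (items : List (String × Option String)) (v : PySem.Set String),
    (items.foldl (pvMark d) (v, true)).2 = true := by
  intro items
  induction items with
  | nil => intro v; rfl
  | cons kv rest ih =>
    intro v
    rw [List.foldl_cons]
    rcases kv with ⟨k, w⟩
    cases w with
    | none => exact ih v
    | some p =>
      simp only [pvMark]
      split
      · exact ih _
      · exact ih v

lemma pvMarkFold_false (d : PySem.Dict String (Option String)) :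
    ∀ (items : List (String × Option String)) (v : PySem.Set String),
    (items.foldl (pvMark d) (v, false)).2 = false →
    (items.foldl (pvMark d) (v, false)).1 = v ∧
      ∀ kv ∈ items, pvMark d (v, false) kv = (v, false) := by
  intro items
  induction items with
  | nil => intro v _; exact ⟨rfl, fun kv h => absurd h (List.not_mem_nil)⟩
  | cons kv rest ih =>
    intro v hfl
    rw [List.foldl_cons] at hfl
    have hid : pvMark d (v, false) kv = (v, false) := by
      rcases kv with ⟨k, w⟩
      cases w with
      | none => rfl
      | some p =>
        by_cases hc : PySem.Set.contains (v, false).1 k = true ∧ p ≠ k ∧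
            d.contains p = true ∧ PySem.Set.contains (v, false).1 p = false
        · exfalso
          have hid2 : pvMark d (v, false) (k, some p) = (PySem.Set.add v p, true) := by
            simp only [pvMark]; rw [if_pos hc]
          rw [hid2, pvMarkFold_snd_true d rest (PySem.Set.add v p)] at hfl
          exact absurd hfl (by decide)
        · simp only [pvMark]; rw [if_neg hc]
    rw [hid] at hfl
    obtain ⟨h1, h2⟩ := ih v hfl
    refine ⟨by rw [List.foldl_cons, hid]; exact h1, ?_⟩
    intro a ha
    rcases List.mem_cons.mp ha with he | he
    · exact he ▸ hid
    · exact h2 a he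

-- B's fixpoint: contains the start set
lemma pvBFix_mono (d : PySem.Dict String (Option String)) (visited : PySem.Set String) :
    ∀ x, PySem.Set.contains visited x = true →
      PySem.Set.contains (pvBFix d visited) x = true := by
  fun_induction pvBFix d visited with
  | case1 visited hch ih =>
    intro x hx
    exact ih x (pvMarkFold_mono d d.items (visited, false) x hx)
  | case2 visited hch =>
    intro x hx
    exact pvMarkFold_mono d d.items (visited, false) x hx

-- B's fixpoint: sound for pvReach
lemma pvBFix_sound (d : PySem.Dict String (Option String)) (sel0 : List String)
    (hnd : d.keys.Nodup) (visited : PySem.Set String)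
    (hst : ∀ x, PySem.Set.contains visited x = true → pvReach sel0 d x) :
    ∀ x, PySem.Set.contains (pvBFix d visited) x = true → pvReach sel0 d x := by
  fun_induction pvBFix d visited with
  | case1 visited hch ih =>
    exact ih (pvMarkFold_sound d sel0 hnd d.items (fun kv h => h) (visited, false) hst)
  | case2 visited hch =>
    exact pvMarkFold_sound d sel0 hnd d.items (fun kv h => h) (visited, false) hst

-- B's fixpoint: step-closed (the last sweep changed nothing)
lemma pvBFix_closed (d : PySem.Dict String (Option String)) (visited : PySem.Set String) :
    ∀ x y, PySem.Set.contains (pvBFix d visited) x = true → pvStep d x y →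
      PySem.Set.contains (pvBFix d visited) y = true := by
  fun_induction pvBFix d visited with
  | case1 visited hch ih => exact ih
  | case2 visited hch =>
    intro x y hx hxy
    simp only [pvSweep] at hx ⊢
    have hfl : (d.items.foldl (pvMark d) (visited, false)).2 = false := by
      cases h : (d.items.foldl (pvMark d) (visited, false)).2 with
      | false => rfl
      | true => exact absurd h hch
    obtain ⟨heq, hall⟩ := pvMarkFold_false d d.items visited hfl
    rw [heq] at hx ⊢
    obtain ⟨hgy, hne, hky⟩ := hxy
    have hg : d.get? x = some (some y) := by
      cases hh : d.get? x with
      | none => rw [hh] at hgy; exact absurd hgy (by simp)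
      | some v => rw [hh] at hgy; exact congrArg some (by simpa using hgy)
    have hitem : (x, some y) ∈ d.items := PySem.Dict.mem_items_of_get?_eq_some d hg
    have hthis := hall (x, some y) hitem
    cases hcy : PySem.Set.contains visited y with
    | true => rfl
    | false =>
      exfalso
      have hcond : PySem.Set.contains (visited, false).1 (x, some y).1 = true ∧
          y ≠ (x, some y).1 ∧ d.contains y = true ∧
          PySem.Set.contains (visited, false).1 y = false := ⟨hx, hne, hky, hcy⟩
      have hid : pvMark d (visited, false) (x, some y) = (PySem.Set.add visited y, true) := by
        simp only [pvMark]; rw [if_pos hcond]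
      rw [hid] at hthis
      exact absurd (congrArg Prod.snd hthis) (by simp)

-- B's visited set holds exactly the pvReach-able ids
lemma pvB_iff (d : PySem.Dict String (Option String)) (selected_ids : List String)
    (hnd : d.keys.Nodup) (x : String) :
    PySem.Set.contains (pvBFix d (PySem.Set.ofList selected_ids)) x = true ↔
      pvReach selected_ids d x := by
  constructor
  · exact pvBFix_sound d selected_ids hnd (PySem.Set.ofList selected_ids)
      (fun z hz => pvReach.base ((PySem.Set.mem_ofList _ _).mp ((PySem.Set.contains_iff _ _).mp hz))) x
  · intro hr
    induction hr with
    | base hx =>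
      exact pvBFix_mono d _ _
        ((PySem.Set.contains_iff _ _).mpr ((PySem.Set.mem_ofList _ _).mpr hx))
    | step _ hs ihr => exact pvBFix_closed d _ _ _ ihr hs

-- ===== VERDICT (by name: the statement is the Claim_ definition above) =====
theorem resolve_precursors_locally_py_spec : Claim_equal_resolve_precursors_locally_py := by
  intro selected_ids precursor_by_id source_order _
  unfold Spec_resolve_precursors_locally_py
  unfold resolve_precursors_locally_py resolve_precursors_locally_py_alt
  apply List.filter_congr
  intro x _
  rw [Bool.eq_iff_iff]
  exact (pvA_iff (PySem.Dict.ofList precursor_by_id) selected_ids x).trans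
    (pvB_iff (PySem.Dict.ofList precursor_by_id) selected_ids
      (PySem.Dict.nodup_keys_ofList precursor_by_id) x).symm
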